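-- pv_equiv track=rewrite | github.com/Panda4817/advent-of-code-2022 | year2018/10/10.py | isAligned
-- ===== SOURCE A (Python) =====
-- def isAligned(stars):
--     row = [-1, -1, -1, 0, 0, 1, 1, 1]
--     col = [-1, 0, 1, -1, 1, -1, 0, 1]
--     for star in stars:
--         aligned = False
--         for i in range(8):
--             y = star[1] + row[i]
--             x = star[0] + col[i]
--             if [x, y] in stars:
--                 aligned = True
--                 break
--         if not aligned:
--             return False
--
--     return True
-- ===== SOURCE B (Python) =====
-- def isAligned(stars):
--     # Invert the neighbor search: index every star under each of the 8 positions
--     # it probes, then let each actual star position answer the probes aimed at it;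
--     # a star is aligned exactly when one of its probes was answered.
--     offsets = [(-1, -1), (-1, 0), (-1, 1), (0, -1), (0, 1), (1, -1), (1, 0), (1, 1)]
--     probers = {}
--     for s in stars:
--         for dx, dy in offsets:
--             probers.setdefault((s[0] + dx, s[1] + dy), []).append(s)
--     answered = {tuple(p) for s in stars for p in probers.get(tuple(s), [])}
--     return all(tuple(s) in answered for s in stars)
-- ===== Notes on version B (the rewrite author's own statement) =====
-- stated objective: alternative
-- what changed: Inverts A's gather (for each star, test each of its 8 neighbor positions against the whole list with `in`) into a hash-index scatter: one pass indexes every star under the 8 positions it probes, one pass lets each star position answer the probes aimed at it, and a final membership pass checks every star was answered; Pre_ restricts input to stars with at least two coordinates, since A raises IndexError on shorter entries unless an earlier star already made it return False.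
-- outside the precondition, e.g. on isAligned([[5, 5], [0]]): A returns False, B raises IndexError
import Mathlib
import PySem

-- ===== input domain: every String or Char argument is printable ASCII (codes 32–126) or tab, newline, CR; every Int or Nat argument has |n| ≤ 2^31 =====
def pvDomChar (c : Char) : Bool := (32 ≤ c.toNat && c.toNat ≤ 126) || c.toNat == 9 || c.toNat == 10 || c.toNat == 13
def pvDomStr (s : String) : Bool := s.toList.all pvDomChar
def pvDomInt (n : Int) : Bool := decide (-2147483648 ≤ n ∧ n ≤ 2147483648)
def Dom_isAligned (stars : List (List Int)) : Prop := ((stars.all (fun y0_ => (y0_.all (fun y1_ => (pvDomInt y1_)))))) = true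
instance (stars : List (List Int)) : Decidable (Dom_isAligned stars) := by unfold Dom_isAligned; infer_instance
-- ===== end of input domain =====

-- B inverts A's gather (each star scans the star list for each of its 8 neighbor
-- positions) into a hash-index: one pass indexes stars by the positions they probe,
-- one pass answers the probes, one membership pass checks every star was answered.

-- ===== PORT A =====
def pvRow : List Int := [-1, -1, -1, 0, 0, 1, 1, 1]
def pvCol : List Int := [-1, 0, 1, -1, 1, -1, 0, 1]

def isAligned (stars : List (List Int)) : Bool :=
  -- for star in stars: inner loop over range(8) with break = any; early `return False` = all
  stars.all (fun star =>
    (List.range 8).any (fun i =>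
      -- y = star[1] + row[i]; x = star[0] + col[i]  (in range under Pre_)
      stars.contains [PySem.List.pyGetD star 0 0 + pvCol.getD i 0,
                      PySem.List.pyGetD star 1 0 + pvRow.getD i 0]))

-- ===== PORT B =====
def pvOffsets : List (Int × Int) :=
  [(-1, -1), (-1, 0), (-1, 1), (0, -1), (0, 1), (1, -1), (1, 0), (1, 1)]

-- the probe position (s[0]+dx, s[1]+dy); a Python position tuple is a 2-element list here
def pvKey (s : List Int) (o : Int × Int) : List Int :=
  [PySem.List.pyGetD s 0 0 + o.1, PySem.List.pyGetD s 1 0 + o.2]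

-- probers = {}; for s in stars: for dx, dy in offsets: probers.setdefault(key, []).append(s)
def pvProbers (stars : List (List Int)) : PySem.Dict (List Int) (List (List Int)) :=
  stars.foldl
    (fun d s => pvOffsets.foldl (fun d o => d.modify (pvKey s o) [] (· ++ [s])) d)
    PySem.Dict.empty

def isAligned_alt (stars : List (List Int)) : Bool :=
  let probers := pvProbers stars
  -- answered = {tuple(p) for s in stars for p in probers.get(tuple(s), [])}
  let answered := stars.foldl
    (fun h s => (probers.getD s []).foldl PySem.Set.add h) PySem.Set.empty
  stars.all (fun s => PySem.Set.contains answered s)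

-- ===== PRECONDITION & SPEC =====
-- Pre_ excludes inputs holding a star with fewer than two coordinates: Python A's
-- star[1] (or star[0]) raises IndexError on such a star unless an earlier star already
-- made A return False, and B's indexing pass raises IndexError there as well.
def Pre_isAligned (stars : List (List Int)) : Prop := ∀ s ∈ stars, 2 ≤ s.length
instance (stars : List (List Int)) : Decidable (Pre_isAligned stars) := by
  unfold Pre_isAligned; infer_instance

def pvWitness_isAligned : List (List Int) := [[0, 0], [1, 1]]

def Spec_isAligned (stars : List (List Int)) (out : Bool) : Prop := out = isAligned_alt stars
instance (stars : List (List Int)) (out : Bool) : Decidable (Spec_isAligned stars out) := by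
  unfold Spec_isAligned; infer_instance

-- ===== CLAIM (what is proved, stated in full; the proofs are below) =====
def Claim_equal_isAligned : Prop :=
  ∀ (stars : List (List Int)), Dom_isAligned stars → Pre_isAligned stars →
    Spec_isAligned stars (isAligned stars)

-- ===== LEMMAS AND PROOFS =====

-- the nested index-building loop is the flat modify-fold over all (probe, star) pairs
theorem pv_probers_flat (stars : List (List Int)) (d : PySem.Dict (List Int) (List (List Int))) :
    stars.foldl
      (fun d s => pvOffsets.foldl (fun d o => d.modify (pvKey s o) [] (· ++ [s])) d) d
    = (stars.flatMap (fun s => pvOffsets.map (fun o => (pvKey s o, s)))).foldl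
        (fun d p => d.modify p.1 [] (· ++ [p.2])) d := by
  induction stars generalizing d with
  | nil => simp
  | cons s rest ih =>
    simp only [List.foldl_cons, List.flatMap_cons, List.foldl_append, ih, List.foldl_map]

-- membership in one bucket of the index
theorem pv_mem_bucket (stars : List (List Int)) (k x : List Int) :
    x ∈ (pvProbers stars).getD k [] ↔
      ∃ s ∈ stars, ∃ o ∈ pvOffsets, pvKey s o = k ∧ x = s := by
  rw [pvProbers, pv_probers_flat, PySem.Dict.getD_foldl_modify_append]
  simp only [PySem.Dict.getD_empty, List.nil_append, List.mem_map, List.mem_filter,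
    List.mem_flatMap, beq_iff_eq]
  constructor
  · rintro ⟨a, ⟨⟨s, hs, o, ho, rfl⟩, hk⟩, rfl⟩
    exact ⟨s, hs, o, ho, hk, rfl⟩
  · rintro ⟨s, hs, o, ho, hk, rfl⟩
    exact ⟨(pvKey x o, x), ⟨⟨x, hs, o, ho, rfl⟩, hk⟩, rfl⟩

-- membership after folding a list into a set
theorem pv_mem_addFold {α : Type} [BEq α] [LawfulBEq α] (xs : List α) (h : PySem.Set α) (y : α) :
    y ∈ xs.foldl PySem.Set.add h ↔ y ∈ h ∨ y ∈ xs := by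
  induction xs generalizing h with
  | nil => simp
  | cons x rest ih =>
    simp only [List.foldl_cons, ih, PySem.Set.mem_add, List.mem_cons]
    tauto

-- membership in the answered set
theorem pv_mem_answered (stars : List (List Int)) (probers : PySem.Dict (List Int) (List (List Int)))
    (h : PySem.Set (List Int)) (y : List Int) :
    y ∈ stars.foldl (fun h s => (probers.getD s []).foldl PySem.Set.add h) h ↔
      y ∈ h ∨ ∃ t ∈ stars, y ∈ probers.getD t [] := by
  induction stars generalizing h with
  | nil => simp
  | cons t rest ih =>
    rw [List.foldl_cons, ih, pv_mem_addFold]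
    simp only [List.mem_cons]
    constructor
    · rintro ((h1 | h1) | ⟨t', ht', h1⟩)
      · exact Or.inl h1
      · exact Or.inr ⟨t, Or.inl rfl, h1⟩
      · exact Or.inr ⟨t', Or.inr ht', h1⟩
    · rintro (h1 | ⟨t', (rfl | ht'), h1⟩)
      · exact Or.inl (Or.inl h1)
      · exact Or.inl (Or.inr h1)
      · exact Or.inr ⟨t', ht', h1⟩

-- A's (col, row) table enumerated by i is B's offset list
theorem pv_bridge (stars : List (List Int)) (s : List Int) :
    ((List.range 8).any (fun i =>
        stars.contains [PySem.List.pyGetD s 0 0 + pvCol.getD i 0,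
                        PySem.List.pyGetD s 1 0 + pvRow.getD i 0])) = true ↔
      ∃ o ∈ pvOffsets, pvKey s o ∈ stars := by
  simp only [List.any_eq_true, List.mem_range, List.contains_iff_mem]
  constructor
  · rintro ⟨i, hi, hmem⟩
    interval_cases i
    · exact ⟨(-1, -1), by decide, by simpa [pvKey, pvRow, pvCol] using hmem⟩
    · exact ⟨(0, -1), by decide, by simpa [pvKey, pvRow, pvCol] using hmem⟩
    · exact ⟨(1, -1), by decide, by simpa [pvKey, pvRow, pvCol] using hmem⟩
    · exact ⟨(-1, 0), by decide, by simpa [pvKey, pvRow, pvCol] using hmem⟩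
    · exact ⟨(1, 0), by decide, by simpa [pvKey, pvRow, pvCol] using hmem⟩
    · exact ⟨(-1, 1), by decide, by simpa [pvKey, pvRow, pvCol] using hmem⟩
    · exact ⟨(0, 1), by decide, by simpa [pvKey, pvRow, pvCol] using hmem⟩
    · exact ⟨(1, 1), by decide, by simpa [pvKey, pvRow, pvCol] using hmem⟩
  · rintro ⟨o, ho, hmem⟩
    fin_cases ho
    · exact ⟨0, by norm_num, by simpa [pvKey, pvRow, pvCol] using hmem⟩
    · exact ⟨3, by norm_num, by simpa [pvKey, pvRow, pvCol] using hmem⟩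
    · exact ⟨5, by norm_num, by simpa [pvKey, pvRow, pvCol] using hmem⟩
    · exact ⟨1, by norm_num, by simpa [pvKey, pvRow, pvCol] using hmem⟩
    · exact ⟨6, by norm_num, by simpa [pvKey, pvRow, pvCol] using hmem⟩
    · exact ⟨2, by norm_num, by simpa [pvKey, pvRow, pvCol] using hmem⟩
    · exact ⟨4, by norm_num, by simpa [pvKey, pvRow, pvCol] using hmem⟩
    · exact ⟨7, by norm_num, by simpa [pvKey, pvRow, pvCol] using hmem⟩

-- ===== VERDICT (by name: the statement is the Claim_ definition above) =====
theorem isAligned_spec : Claim_equal_isAligned := by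
  intro stars _hdom _hpre
  unfold Spec_isAligned isAligned isAligned_alt
  rw [Bool.eq_iff_iff]
  simp only [List.all_eq_true]
  refine forall_congr' fun s => forall_congr' fun hs => ?_
  rw [pv_bridge]
  simp only [PySem.Set.contains, List.contains_iff_mem]
  rw [pv_mem_answered]
  simp only [PySem.Set.empty, List.not_mem_nil, false_or]
  constructor
  · rintro ⟨o, ho, hmem⟩
    exact ⟨pvKey s o, hmem, (pv_mem_bucket stars _ s).2 ⟨s, hs, o, ho, rfl, rfl⟩⟩
  · rintro ⟨t, ht, hbucket⟩
    obtain ⟨s', _hs', o, ho, hk, rfl⟩ := (pv_mem_bucket stars t s).1 hbucket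
    exact ⟨o, ho, hk ▸ ht⟩
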